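-- pv_equiv track=rewrite | github.com/kevrothstein/SI206_project1 | 206project1.py | classSizes
-- ===== SOURCE A (Python) =====
-- def classSizes(data):
-- # Input: list of dictionaries
-- # Output: Return a list of tuples ordered by
-- # ClassName and Class size, e.g
-- # [('Senior', 26), ('Junior', 25), ('Freshman', 21), ('Sophomore', 18)]
--
-- 	#Your code here:
-- 	grade_sizes = {'Senior':0, 'Junior':0, 'Freshman':0, 'Sophomore':0}
-- 	for kevin in data:
-- 		if kevin['Class'] == 'Senior':
-- 			grade_sizes['Senior'] += 1
-- 		elif kevin['Class'] == 'Junior':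
-- 			grade_sizes['Junior'] += 1
-- 		elif kevin['Class'] == 'Freshman':
-- 			grade_sizes['Freshman'] += 1
-- 		elif kevin['Class'] == 'Sophomore':
-- 			grade_sizes['Sophomore'] += 1
-- 	sort_class = sorted(grade_sizes, key= lambda kevin: grade_sizes[kevin], reverse= True)
-- 	total = []
-- 	for kevin in sort_class:
-- 		total.append((kevin, grade_sizes[kevin]))
-- 	return total
-- ===== SOURCE B (Python) =====
-- def classSizes(data):
--     # Same result as A: per-class-name counting passes instead of one if/elif loop.
--     grade_sizes = {name: sum(1 for d in data if d['Class'] == name)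
--                    for name in ('Senior', 'Junior', 'Freshman', 'Sophomore')}
--     return [(name, grade_sizes[name])
--             for name in sorted(grade_sizes, key=lambda n: grade_sizes[n], reverse=True)]
-- ===== Notes on version B (the rewrite author's own statement) =====
-- stated objective: alternative
-- what changed: Replaces the single if/elif counting loop over records with one counting pass per class name (dict comprehension of per-name counts) followed by the same stable reverse sort; accumulator dict mutation disappears.
import Mathlib
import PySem

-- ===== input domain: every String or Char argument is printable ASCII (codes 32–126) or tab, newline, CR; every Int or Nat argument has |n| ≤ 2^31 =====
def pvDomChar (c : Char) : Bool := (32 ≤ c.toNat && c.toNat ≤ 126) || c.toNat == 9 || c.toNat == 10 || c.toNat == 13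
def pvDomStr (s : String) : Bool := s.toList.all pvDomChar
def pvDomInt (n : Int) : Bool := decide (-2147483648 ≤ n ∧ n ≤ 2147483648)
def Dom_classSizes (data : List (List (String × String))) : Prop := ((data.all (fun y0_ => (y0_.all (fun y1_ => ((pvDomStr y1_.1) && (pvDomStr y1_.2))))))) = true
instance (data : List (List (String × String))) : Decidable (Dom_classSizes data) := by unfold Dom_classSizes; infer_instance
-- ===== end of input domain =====

-- B counts each class name with a separate pass (a per-name count) instead of A's single
-- if/elif accumulation loop; the ordered dict, the stable reverse sort and the output
-- pairs are identical. Return values only (neither version mutates its argument).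

-- ===== PORT A =====
-- kevin['Class'] : first-match association-list lookup (Pre_ guarantees the key exists)
def pvGetClass (kevin : List (String × String)) : String :=
  (kevin.lookup "Class").getD ""

-- the body of A's for-loop: the if/elif chain of increments
def pvStep (gs : PySem.Dict String Int) (kevin : List (String × String)) :
    PySem.Dict String Int :=
  let c := pvGetClass kevin
  if c = "Senior" then gs.modify "Senior" 0 (· + 1)
  else if c = "Junior" then gs.modify "Junior" 0 (· + 1)
  else if c = "Freshman" then gs.modify "Freshman" 0 (· + 1)
  else if c = "Sophomore" then gs.modify "Sophomore" 0 (· + 1)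
  else gs

def classSizes (data : List (List (String × String))) : List (String × Int) :=
  let gs0 : PySem.Dict String Int :=
    PySem.Dict.mk [("Senior", 0), ("Junior", 0), ("Freshman", 0), ("Sophomore", 0)]
  let gs := data.foldl pvStep gs0
  let sortClass := PySem.List.sorted gs.keys (fun kevin => gs.getD kevin 0) true
  sortClass.foldl (fun total kevin => total ++ [(kevin, gs.getD kevin 0)]) []

-- ===== PORT B =====
-- sum(1 for d in data if d['Class'] == name)
def pvCount (data : List (List (String × String))) (name : String) : Int :=
  (data.countP (fun d => pvGetClass d == name) : Int)

def classSizes_alt (data : List (List (String × String))) : List (String × Int) :=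
  let gs : PySem.Dict String Int :=
    PySem.Dict.mk (["Senior", "Junior", "Freshman", "Sophomore"].map
      (fun name => (name, pvCount data name)))
  (PySem.List.sorted gs.keys (fun n => gs.getD n 0) true).map
    (fun name => (name, gs.getD name 0))

-- ===== PRECONDITION & SPEC =====
-- Pre_ excludes records without a 'Class' key, on which the Python A (and B) raise KeyError.
def Pre_classSizes (data : List (List (String × String))) : Prop :=
  (data.all (fun r => r.any (fun p => p.1 == "Class"))) = true
instance (data : List (List (String × String))) : Decidable (Pre_classSizes data) := by
  unfold Pre_classSizes; infer_instance
def pvWitness_classSizes : (List (List (String × String))) :=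
  [[("Class", "Senior")], [("Class", "Junior")]]

def Spec_classSizes (data : List (List (String × String))) (out : List (String × Int)) : Prop := out = classSizes_alt data
instance (data : List (List (String × String))) (out : List (String × Int)) : Decidable (Spec_classSizes data out) := by unfold Spec_classSizes; infer_instance

-- ===== CLAIM (what is proved, stated in full; the proofs are below) =====
def Claim_equal_classSizes : Prop := ∀ (data : List (List (String × String))), Dom_classSizes data → Pre_classSizes data → Spec_classSizes data (classSizes data)

-- ===== LEMMAS AND PROOFS =====

theorem pvStep_eq (kevin : List (String × String)) (a b c e : Int) :
    pvStep (PySem.Dict.mk [("Senior", a), ("Junior", b), ("Freshman", c), ("Sophomore", e)]) kevin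
    = PySem.Dict.mk
        [("Senior", a + if pvGetClass kevin == "Senior" then 1 else 0),
         ("Junior", b + if pvGetClass kevin == "Junior" then 1 else 0),
         ("Freshman", c + if pvGetClass kevin == "Freshman" then 1 else 0),
         ("Sophomore", e + if pvGetClass kevin == "Sophomore" then 1 else 0)] := by
  by_cases h1 : pvGetClass kevin = "Senior"
  · simp [pvStep, h1, PySem.Dict.modify, PySem.Dict.insert, PySem.Dict.getD,
      PySem.Dict.get?, PySem.Dict.contains]
  · by_cases h2 : pvGetClass kevin = "Junior"
    · simp [pvStep, h2, PySem.Dict.modify, PySem.Dict.insert, PySem.Dict.getD,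
        PySem.Dict.get?, PySem.Dict.contains]
    · by_cases h3 : pvGetClass kevin = "Freshman"
      · simp [pvStep, h3, PySem.Dict.modify, PySem.Dict.insert, PySem.Dict.getD,
          PySem.Dict.get?, PySem.Dict.contains]
      · by_cases h4 : pvGetClass kevin = "Sophomore"
        · simp [pvStep, h4, PySem.Dict.modify, PySem.Dict.insert, PySem.Dict.getD,
            PySem.Dict.get?, PySem.Dict.contains]
        · simp [pvStep, h1, h2, h3, h4]

-- A's counting loop, from any four starting counts, adds B's per-name counts.
theorem foldA_eq (data : List (List (String × String))) (a b c e : Int) :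
    data.foldl pvStep
      (PySem.Dict.mk [("Senior", a), ("Junior", b), ("Freshman", c), ("Sophomore", e)])
    = PySem.Dict.mk [("Senior", a + pvCount data "Senior"),
        ("Junior", b + pvCount data "Junior"),
        ("Freshman", c + pvCount data "Freshman"),
        ("Sophomore", e + pvCount data "Sophomore")] := by
  induction data generalizing a b c e with
  | nil => simp [pvCount]
  | cons k t ih =>
    rw [List.foldl_cons, pvStep_eq, ih]
    simp only [pvCount, List.countP_cons, PySem.Dict.mk.injEq, List.cons.injEq,
      Prod.mk.injEq, true_and, and_true]
    refine ⟨?_, ?_, ?_, ?_⟩ <;>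
      · push_cast
        split <;> simp_all <;> ring

-- ===== VERDICT (by name: the statement is the Claim_ definition above) =====
theorem classSizes_spec : Claim_equal_classSizes := by
  intro data _ _
  unfold Spec_classSizes classSizes classSizes_alt
  simp only []
  rw [foldA_eq]
  simp only [List.map, zero_add]
  rw [PySem.List.foldl_append_singleton_eq_map]
  simp
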